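-- pv_equiv track=rewrite | github.com/unilaiva/unilaiva-songbook | ulsbs/src/ulsbs/songdb.py | _parse_optional_bracket_argument
-- ===== SOURCE A (Python) =====
-- from typing import Any, Dict, List, Sequence, Tuple
--
-- def _parse_optional_bracket_argument(src: str, start: int) -> Tuple[str | None, int]:
--     """
--     Parse an optional [ ... ] argument starting at start.
--
--     If there is no [ at start, returns (None, start).
--     Nested brackets are handled.
--     """
--
--     if start >= len(src) or src[start] != "[":
--         return None, start
--     depth = 0
--     i = start
--     out_chars: List[str] = []
--     while i < len(src):
--         ch = src[i]
--         if ch == "[":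
--             if depth > 0:
--                 out_chars.append(ch)
--             depth += 1
--         elif ch == "]":
--             depth -= 1
--             if depth == 0:
--                 return "".join(out_chars), i + 1
--             out_chars.append(ch)
--         else:
--             out_chars.append(ch)
--         i += 1
--     raise ValueError("Unterminated '[' starting at %d" % start)
-- ===== SOURCE B (Python) =====
-- from typing import List, Tuple
--
--
-- def _parse_optional_bracket_argument(src: str, start: int) -> Tuple[str | None, int]:
--     """Recursive-descent variant: parse an optional [ ... ] argument at start."""
--     if start >= len(src) or src[start] != "[":
--         return None, start
--
--     def group(i: int) -> Tuple[str, int]: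
--         # i points just past an opening '['; returns (content, index past the
--         # matching ']').
--         parts: List[str] = []
--         while i < len(src):
--             ch = src[i]
--             if ch == "]":
--                 return "".join(parts), i + 1
--             if ch == "[":
--                 sub, i = group(i + 1)
--                 parts.append("[" + sub + "]")
--             else:
--                 parts.append(ch)
--                 i += 1
--         raise ValueError("Unterminated '[' starting at %d" % start)
--
--     return group(start + 1)
-- ===== Notes on version B (the rewrite author's own statement) =====
-- stated objective: alternative
-- what changed: A walks the whole string once with an explicit depth counter and a flat output list; B is a recursive-descent parser whose helper parses one bracket group at a time, recursing into nested groups and re-wrapping them as '[' + sub + ']'.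
import Mathlib
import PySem

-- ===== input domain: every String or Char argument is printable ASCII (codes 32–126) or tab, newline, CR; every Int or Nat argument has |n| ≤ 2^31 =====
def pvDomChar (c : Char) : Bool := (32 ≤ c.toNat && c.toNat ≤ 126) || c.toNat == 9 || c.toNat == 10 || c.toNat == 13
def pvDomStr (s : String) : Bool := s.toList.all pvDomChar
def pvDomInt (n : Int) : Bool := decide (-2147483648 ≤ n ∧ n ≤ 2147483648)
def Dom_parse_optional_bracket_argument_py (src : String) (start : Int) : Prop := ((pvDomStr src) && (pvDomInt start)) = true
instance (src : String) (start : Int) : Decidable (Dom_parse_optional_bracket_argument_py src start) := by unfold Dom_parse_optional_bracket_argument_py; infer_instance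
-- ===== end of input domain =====

-- B re-implements A's single depth-counting while-loop as a recursive-descent parser
-- (objective: alternative decomposition, same cost); equivalence is about the return
-- value on Pre_ (where the Python returns; A raises IndexError/ValueError outside it).

-- ===== PORT A =====
-- A's while-loop: state (i, depth, out_chars); fuel bounds the remaining iterations
-- (chosen large enough that with i < len it never runs out); where Python raises
-- (outside Pre_) the port returns the default (none, start).
def pvAloop (s : List Char) (start : Int) : Nat → Int → Int → List Char → Option String × Int
  | 0, _, _, _ => (none, start)                    -- loop ended: Python raises ValueError (outside Pre_)
  | fuel+1, i, depth, out =>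
    if i < (s.length : Int) then
      match PySem.List.pyGet? s i with
      | none => (none, start)                      -- src[i] IndexError (outside Pre_)
      | some ch =>
        if ch = '[' then
          pvAloop s start fuel (i+1) (depth+1) (if depth > 0 then out ++ [ch] else out)
        else if ch = ']' then
          if depth - 1 = 0 then (some (String.ofList out), i + 1)
          else pvAloop s start fuel (i+1) (depth - 1) (out ++ [ch])
        else
          pvAloop s start fuel (i+1) depth (out ++ [ch])
    else (none, start)                             -- Python raises ValueError here (outside Pre_)

def parse_optional_bracket_argument_py (src : String) (start : Int) : Option String × Int :=
  let s := src.toList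
  if (s.length : Int) ≤ start then (none, start)
  else
    match PySem.List.pyGet? s start with
    | none => (none, start)                        -- src[start] IndexError (outside Pre_)
    | some c =>
      if c ≠ '[' then (none, start)
      else pvAloop s start ((s.length : Int) - start).toNat start 0 []

-- ===== PORT B =====
-- B's recursive helper `group`: i points past an opening '['; returns the group's
-- content and the index past its matching ']'; none = the Python raise (outside Pre_).
def pvBgroup (s : List Char) : Nat → Int → List Char → Option (List Char × Int)
  | 0, _, _ => none                                -- fuel (never reached inside Pre_)
  | fuel+1, i, parts =>
    if i < (s.length : Int) then
      match PySem.List.pyGet? s i with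
      | none => none                               -- src[i] IndexError (outside Pre_)
      | some ch =>
        if ch = ']' then some (parts, i + 1)
        else if ch = '[' then
          match pvBgroup s fuel (i+1) [] with
          | none => none
          | some (sub, j) => pvBgroup s fuel j (parts ++ '[' :: (sub ++ [']']))
        else pvBgroup s fuel (i+1) (parts ++ [ch])
    else none                                      -- Python raises ValueError (outside Pre_)

def parse_optional_bracket_argument_py_alt (src : String) (start : Int) : Option String × Int :=
  let s := src.toList
  if (s.length : Int) ≤ start then (none, start)
  else
    match PySem.List.pyGet? s start with
    | none => (none, start)                        -- src[start] IndexError (outside Pre_)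
    | some c =>
      if c ≠ '[' then (none, start)
      else
        match pvBgroup s ((s.length : Int) - start).toNat (start + 1) [] with
        | none => (none, start)                    -- raise propagates (outside Pre_)
        | some (cs, j) => (some (String.ofList cs), j)

-- ===== PRECONDITION & SPEC =====
-- The character sequence A's loop reads: indices start..len-1, a negative i reading
-- src[len+i] (Python wraparound), so for negative start it is a tail of s followed by s.
def pvScanSeq (s : List Char) (start : Int) : List Char :=
  if 0 ≤ start then s.drop start.toNat else s.drop (s.length + start).toNat ++ s

-- Pre_ excludes exactly the inputs where A raises: start < -len (IndexError at
-- src[start]) and a '[' at start with no balanced prefix of the scanned sequence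
-- (unterminated bracket, ValueError). A returns on every input Pre_ admits.
def Pre_parse_optional_bracket_argument_py (src : String) (start : Int) : Prop :=
  (src.toList.length : Int) ≤ start ∨
  (-(src.toList.length : Int) ≤ start ∧ PySem.List.pyGet? src.toList start ≠ some '[') ∨
  (PySem.List.pyGet? src.toList start = some '[' ∧
    ∃ k < (pvScanSeq src.toList start).length + 1, 0 < k ∧
      ((pvScanSeq src.toList start).take k).count '[' =
        ((pvScanSeq src.toList start).take k).count ']')

instance (src : String) (start : Int) : Decidable (Pre_parse_optional_bracket_argument_py src start) := by
  unfold Pre_parse_optional_bracket_argument_py; infer_instance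

def pvWitness_parse_optional_bracket_argument_py : String × Int := ("[a[b]]", 0)

def Spec_parse_optional_bracket_argument_py (src : String) (start : Int) (out : Option String × Int) : Prop := out = parse_optional_bracket_argument_py_alt src start
instance (src : String) (start : Int) (out : Option String × Int) : Decidable (Spec_parse_optional_bracket_argument_py src start out) := by unfold Spec_parse_optional_bracket_argument_py; infer_instance

-- ===== CLAIM (what is proved, stated in full; the proofs are below) =====
def Claim_equal_parse_optional_bracket_argument_py : Prop := ∀ (src : String) (start : Int), Dom_parse_optional_bracket_argument_py src start → Pre_parse_optional_bracket_argument_py src start → Spec_parse_optional_bracket_argument_py src start (parse_optional_bracket_argument_py src start)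

-- ===== LEMMAS AND PROOFS =====

-- Proof-side reference scanner: content from i until the depth counter (starting at
-- depth) first returns to 0, paired with the index past the closing ']'.
def pvScan (s : List Char) : Nat → Int → Int → Option (List Char × Int)
  | 0, _, _ => none
  | fuel+1, i, depth =>
    if i < (s.length : Int) then
      match PySem.List.pyGet? s i with
      | none => none
      | some ch =>
        if ch = '[' then
          match pvScan s fuel (i+1) (depth+1) with
          | none => none
          | some (cs, j) => some (ch :: cs, j)
        else if ch = ']' then
          if depth - 1 = 0 then some ([], i + 1)
          else
            match pvScan s fuel (i+1) (depth - 1) with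
            | none => none
            | some (cs, j) => some (ch :: cs, j)
        else
          match pvScan s fuel (i+1) depth with
          | none => none
          | some (cs, j) => some (ch :: cs, j)
    else none


theorem pvScan_stop (s : List Char) (f : Nat) (i d : Int) (hi : ¬ i < (s.length : Int)) :
    pvScan s f i d = none := by cases f <;> simp [pvScan, hi]

theorem pvScan_none (s : List Char) (f : Nat) (i d : Int) (hi : i < (s.length : Int))
    (hch : PySem.List.pyGet? s i = none) : pvScan s (f+1) i d = none := by
  simp [pvScan, hi, hch]

theorem pvScan_open (s : List Char) (f : Nat) (i d : Int) (hi : i < (s.length : Int))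
    (hch : PySem.List.pyGet? s i = some '[') :
    pvScan s (f+1) i d =
      match pvScan s f (i+1) (d+1) with
      | none => none
      | some (cs, j) => some ('[' :: cs, j) := by
  simp only [pvScan, if_pos hi, hch, Char.reduceEq, reduceIte]

theorem pvScan_close_hit (s : List Char) (f : Nat) (i d : Int) (hi : i < (s.length : Int))
    (hch : PySem.List.pyGet? s i = some ']') (hz : d - 1 = 0) :
    pvScan s (f+1) i d = some ([], i + 1) := by
  simp only [pvScan, if_pos hi, hch, Char.reduceEq, reduceIte, if_pos hz]

theorem pvScan_close (s : List Char) (f : Nat) (i d : Int) (hi : i < (s.length : Int))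
    (hch : PySem.List.pyGet? s i = some ']') (hz : ¬ d - 1 = 0) :
    pvScan s (f+1) i d =
      match pvScan s f (i+1) (d-1) with
      | none => none
      | some (cs, j) => some (']' :: cs, j) := by
  simp only [pvScan, if_pos hi, hch, Char.reduceEq, reduceIte, if_neg hz]

theorem pvScan_other (s : List Char) (f : Nat) (i d : Int) (ch : Char) (hi : i < (s.length : Int))
    (hch : PySem.List.pyGet? s i = some ch) (h1 : ¬ ch = '[') (h2 : ¬ ch = ']') :
    pvScan s (f+1) i d =
      match pvScan s f (i+1) d with
      | none => none
      | some (cs, j) => some (ch :: cs, j) := by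
  simp only [pvScan, if_pos hi, hch, if_neg h1, if_neg h2]

theorem pvScan_pos (s : List Char) : ∀ (f : Nat) (i d : Int) (cs : List Char) (j : Int),
    pvScan s f i d = some (cs, j) → i + 1 ≤ j := by
  intro f
  induction f with
  | zero => intro i d cs j h; simp [pvScan] at h
  | succ f ih =>
    intro i d cs j h
    simp only [pvScan] at h
    split at h
    · split at h
      · exact absurd h (by simp)
      · split at h
        · split at h
          · exact absurd h (by simp)
          · simp only [Option.some.injEq, Prod.mk.injEq] at h
            have := ih _ _ _ _ ‹_›
            omega
        · split at h
          · split at h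
            · simp only [Option.some.injEq, Prod.mk.injEq] at h
              omega
            · split at h
              · exact absurd h (by simp)
              · simp only [Option.some.injEq, Prod.mk.injEq] at h
                have := ih _ _ _ _ ‹_›
                omega
          · split at h
            · exact absurd h (by simp)
            · simp only [Option.some.injEq, Prod.mk.injEq] at h
              have := ih _ _ _ _ ‹_›
              omega
    · exact absurd h (by simp)

theorem pvScan_fuel (s : List Char) : ∀ (f g : Nat) (i d : Int),
    (s.length : Int) - i ≤ (f : Int) → (s.length : Int) - i ≤ (g : Int) →
    pvScan s f i d = pvScan s g i d := by
  intro f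
  induction f with
  | zero =>
    intro g i d hf hg
    cases g with
    | zero => rfl
    | succ g =>
      simp only [pvScan]
      rw [if_neg (by push_cast at hf; omega)]
  | succ f ih =>
    intro g i d hf hg
    cases g with
    | zero =>
      simp only [pvScan]
      rw [if_neg (by push_cast at hg; omega)]
    | succ g =>
      simp only [pvScan]
      by_cases hi : i < (s.length : Int)
      · rw [if_pos hi, if_pos hi]
        cases hch : PySem.List.pyGet? s i with
        | none => rfl
        | some ch =>
          have h1 : (s.length : Int) - (i+1) ≤ (f : Int) := by push_cast at hf; omega
          have h2 : (s.length : Int) - (i+1) ≤ (g : Int) := by push_cast at hg; omega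
          by_cases hl : ch = '['
          · simp only [if_pos hl, ih g (i+1) (d+1) h1 h2]
          · by_cases hr : ch = ']'
            · simp only [if_neg hl, if_pos hr, ih g (i+1) (d-1) h1 h2]
            · simp only [if_neg hl, if_neg hr, ih g (i+1) d h1 h2]
      · rw [if_neg hi, if_neg hi]


theorem pvScan_split (s : List Char) : ∀ (f : Nat) (i d : Int),
    0 < d → (s.length : Int) - i ≤ (f : Int) →
    pvScan s f i (d+1) =
      match pvScan s f i 1 with
      | none => none
      | some (cs, j) =>
        match pvScan s f j d with
        | none => none
        | some (cs2, k) => some (cs ++ ']' :: cs2, k) := by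
  intro f
  induction f with
  | zero => intro i d hd hf; simp [pvScan]
  | succ f ih =>
    intro i d hd hf
    have hfc : (s.length : Int) - i ≤ (f : Int) + 1 := by push_cast at hf; omega
    by_cases hi : i < (s.length : Int)
    · have hf' : (s.length : Int) - (i+1) ≤ (f : Int) := by omega
      cases hch : PySem.List.pyGet? s i with
      | none => rw [pvScan_none s f i (d+1) hi hch, pvScan_none s f i 1 hi hch]
      | some ch =>
        by_cases hl : ch = '['
        · subst hl
          rw [pvScan_open s f i (d+1) hi hch, pvScan_open s f i 1 hi hch]
          rw [ih (i+1) (d+1) (by omega) hf', ih (i+1) 1 (by norm_num) hf']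
          cases h1 : pvScan s f (i+1) 1 with
          | none => rfl
          | some p =>
            obtain ⟨csa, j⟩ := p
            have hj := pvScan_pos s f (i+1) 1 csa j h1
            dsimp only
            rw [ih j d hd (by omega)]
            cases h2 : pvScan s f j 1 with
            | none => rfl
            | some q =>
              obtain ⟨csb, k⟩ := q
              have hk := pvScan_pos s f j 1 csb k h2
              dsimp only
              rw [pvScan_fuel s (f+1) f k d (by push_cast; omega) (by omega)]
              cases h3 : pvScan s f k d with
              | none => rfl
              | some r => dsimp only; simp
        · by_cases hrb : ch = ']'
          · subst hrb
            rw [pvScan_close s f i (d+1) hi hch (by omega),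
                pvScan_close_hit s f i 1 hi hch (by norm_num)]
            have hdd : d + 1 - 1 = d := by omega
            rw [hdd]
            dsimp only
            rw [pvScan_fuel s (f+1) f (i+1) d (by push_cast; omega) hf']
            cases h1 : pvScan s f (i+1) d with
            | none => rfl
            | some p => dsimp only; simp
          · rw [pvScan_other s f i (d+1) ch hi hch hl hrb,
                pvScan_other s f i 1 ch hi hch hl hrb]
            rw [ih (i+1) d hd hf']
            cases h1 : pvScan s f (i+1) 1 with
            | none => rfl
            | some p =>
              obtain ⟨csa, j⟩ := p
              have hj := pvScan_pos s f (i+1) 1 csa j h1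
              dsimp only
              rw [pvScan_fuel s (f+1) f j d (by push_cast; omega) (by omega)]
              cases h2 : pvScan s f j d with
              | none => rfl
              | some q => dsimp only; simp
    · rw [pvScan_stop s (f+1) i (d+1) hi, pvScan_stop s (f+1) i 1 hi]

theorem pvAloop_norm (s : List Char) (start : Int) : ∀ (f : Nat) (i d : Int) (out : List Char),
    0 < d →
    pvAloop s start f i d out =
      match pvScan s f i d with
      | none => (none, start)
      | some (cs, j) => (some (String.ofList (out ++ cs)), j) := by
  intro f
  induction f with
  | zero => intro i d out hd; simp [pvAloop, pvScan]
  | succ f ih =>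
    intro i d out hd
    simp only [pvAloop, pvScan]
    by_cases hi : i < (s.length : Int)
    · rw [if_pos hi, if_pos hi]
      cases hch : PySem.List.pyGet? s i with
      | none => rfl
      | some ch =>
        by_cases hl : ch = '['
        · simp only [if_pos hl, if_pos hd]
          rw [ih (i+1) (d+1) (out ++ [ch]) (by omega)]
          cases hr : pvScan s f (i+1) (d+1) with
          | none => rfl
          | some p => simp
        · by_cases hrb : ch = ']'
          · simp only [if_neg hl, if_pos hrb]
            by_cases hz : d - 1 = 0
            · rw [if_pos hz, if_pos hz]; simp
            · rw [if_neg hz, if_neg hz]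
              rw [ih (i+1) (d-1) (out ++ [ch]) (by omega)]
              cases hr : pvScan s f (i+1) (d-1) with
              | none => rfl
              | some p => simp
          · simp only [if_neg hl, if_neg hrb]
            rw [ih (i+1) d (out ++ [ch]) hd]
            cases hr : pvScan s f (i+1) d with
            | none => rfl
            | some p => simp
    · rw [if_neg hi, if_neg hi]

theorem pvBgroup_norm (s : List Char) : ∀ (f : Nat) (i : Int) (parts : List Char),
    (s.length : Int) - i < (f : Int) →
    pvBgroup s f i parts =
      match pvScan s f i 1 with
      | none => none
      | some (cs, j) => some (parts ++ cs, j) := by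
  intro f
  induction f with
  | zero => intro i parts h; simp [pvBgroup, pvScan]
  | succ f ih =>
    intro i parts h
    have hc : (s.length : Int) - i < (f : Int) + 1 := by push_cast at h; omega
    by_cases hi : i < (s.length : Int)
    · have h' : (s.length : Int) - (i+1) < (f : Int) := by omega
      cases hch : PySem.List.pyGet? s i with
      | none => simp only [pvBgroup, if_pos hi, hch]; rw [pvScan_none s f i 1 hi hch]
      | some ch =>
        by_cases hcr : ch = ']'
        · subst hcr
          simp only [pvBgroup, if_pos hi, hch, Char.reduceEq, reduceIte]
          rw [pvScan_close_hit s f i 1 hi hch (by norm_num)]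
          simp
        · by_cases hco : ch = '['
          · subst hco
            simp only [pvBgroup, if_pos hi, hch, Char.reduceEq, reduceIte]
            rw [ih (i+1) [] h']
            rw [pvScan_open s f i 1 hi hch]
            rw [pvScan_split s f (i+1) 1 (by norm_num) (by omega)]
            cases h1 : pvScan s f (i+1) 1 with
            | none => rfl
            | some p =>
              obtain ⟨sub, j⟩ := p
              have hj := pvScan_pos s f (i+1) 1 sub j h1
              dsimp only
              rw [List.nil_append]
              rw [ih j (parts ++ '[' :: (sub ++ [']'])) (by omega)]
              cases h2 : pvScan s f j 1 with
              | none => rfl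
              | some q => dsimp only; simp
          · simp only [pvBgroup, if_pos hi, hch, if_neg hcr, if_neg hco]
            rw [ih (i+1) (parts ++ [ch]) h']
            rw [pvScan_other s f i 1 ch hi hch hco hcr]
            cases h1 : pvScan s f (i+1) 1 with
            | none => rfl
            | some p => dsimp only; simp
    · simp only [pvBgroup, if_neg hi]
      rw [pvScan_stop s (f+1) i 1 hi]

theorem pvPorts_eq (src : String) (start : Int) :
    parse_optional_bracket_argument_py src start = parse_optional_bracket_argument_py_alt src start := by
  simp only [parse_optional_bracket_argument_py, parse_optional_bracket_argument_py_alt]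
  by_cases h1 : (src.toList.length : Int) ≤ start
  · rw [if_pos h1, if_pos h1]
  · rw [if_neg h1, if_neg h1]
    cases hch : PySem.List.pyGet? src.toList start with
    | none => rfl
    | some c =>
      dsimp only
      by_cases hc : c = '['
      · subst hc
        rw [if_neg (by simp), if_neg (by simp)]
        have hnn : (0:Int) ≤ (src.toList.length : Int) - start := by omega
        have hFi : ((((src.toList.length : Int) - start).toNat : Int)) = (src.toList.length : Int) - start :=
          Int.toNat_of_nonneg hnn
        obtain ⟨f', hf'⟩ : ∃ f', ((src.toList.length : Int) - start).toNat = f' + 1 :=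
          ⟨((src.toList.length : Int) - start).toNat - 1, by omega⟩
        have hfi' : (f' : Int) = (src.toList.length : Int) - start - 1 := by
          rw [hf'] at hFi; push_cast at hFi; omega
        rw [hf']
        simp only [pvAloop]
        rw [if_pos (by omega : start < (src.toList.length : Int)), hch]
        dsimp only
        rw [if_pos rfl, if_neg (by norm_num : ¬ (0:Int) > 0)]
        rw [show (0:Int) + 1 = 1 from by norm_num]
        rw [pvAloop_norm src.toList start f' (start+1) 1 [] (by norm_num)]
        rw [pvBgroup_norm src.toList (f'+1) (start+1) [] (by push_cast; omega)]
        rw [pvScan_fuel src.toList (f'+1) f' (start+1) 1 (by push_cast; omega) (by omega)]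
        cases hsc : pvScan src.toList f' (start+1) 1 with
        | none => rfl
        | some p => rfl
      · rw [if_pos hc, if_pos hc]

-- ===== VERDICT (by name: the statement is the Claim_ definition above) =====
theorem parse_optional_bracket_argument_py_spec : Claim_equal_parse_optional_bracket_argument_py := by
  intro src start _ _
  exact pvPorts_eq src start
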